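-- pv_equiv track=rewrite | github.com/JohnSmithDev/ISFDB-Tools | award_related.py | extract_authors_from_author_field
-- ===== SOURCE A (Python) =====
-- DONT_USE_THESE_REAL_NAMES = (
--     'Compton Crook',
-- )
--
-- MULTIPLE_AUTHORS_SEPARATOR = '+' # e.g. Brandon Sanderson + someone I think?
--
-- PSEUDONYM_SEPARATOR = '^' # e.g. Edmond Hamilton^Brett Sterling (Retro Hugo Novel 1946)
--
-- class BadArgumentError(Exception):
--     pass
--
-- def extract_authors_from_author_field(raw_txt, wanted_types='all'):
--     """
--     AFAIK the use of MULTIPLE_AUTHORS_SEPARATOR and PSEUDONYM_SEPARATOR is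
--     unique to the awards table - if not, then this function would probably
--     be best moved elsewhere.
--
--     wanted_types is one of 'all', 'credited', or 'real'
--     """
--     if wanted_types not in ('all', 'credited', 'real'):
--         raise BadArgumentError('Invalid wanted_types (%s) - should be one of all/credited/real' %
--                                (wanted_types))
--
--     txt = raw_txt.strip()
--     if txt.startswith('(') and txt.endswith(')'): # "(Henry Kuttner+C. L. Moore)" - but see below
--         txt = txt[1:-1].strip()
--     if PSEUDONYM_SEPARATOR in txt:
--         # We only want to use one of these
--         real_name, pseudonym = txt.split(PSEUDONYM_SEPARATOR)
--         # For now assume the real name is right TODO: test both, and use the best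
--         # UPDATE: That assumption turned out to be wrong for "Compton Crook^Stephen Tall"
--
--         # Note that we can have both separators e.g.
--         # '(Henry Kuttner+C. L. Moore)^Lewis Padgett' hence the recursion
--         if wanted_types == 'all':
--             authors = extract_authors_from_author_field(pseudonym)
--             authors.extend(extract_authors_from_author_field(real_name))
--             return authors
--         elif wanted_types == 'real':
--             if real_name in DONT_USE_THESE_REAL_NAMES:
--                 return extract_authors_from_author_field(pseudonym)
--             else:
--                 return extract_authors_from_author_field(real_name)
--         else:
--             return extract_authors_from_author_field(pseudonym)
--     else:
--         authors = txt.split(MULTIPLE_AUTHORS_SEPARATOR)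
--     return [z.strip() for z in authors] # extra strip just to be super-sure
-- ===== SOURCE B (Python) =====
-- DONT_USE_THESE_REAL_NAMES = (
--     'Compton Crook',
-- )
--
-- MULTIPLE_AUTHORS_SEPARATOR = '+'
--
-- PSEUDONYM_SEPARATOR = '^'
--
-- class BadArgumentError(Exception):
--     pass
--
-- def _leaf_authors(txt):
--     """Strip, drop one surrounding '(...)' pair, split on '+', strip the pieces."""
--     txt = txt.strip()
--     if txt.startswith('(') and txt.endswith(')'):
--         txt = txt[1:-1].strip()
--     return [z.strip() for z in txt.split(MULTIPLE_AUTHORS_SEPARATOR)]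
--
-- def extract_authors_from_author_field(raw_txt, wanted_types='all'):
--     if wanted_types not in ('all', 'credited', 'real'):
--         raise BadArgumentError('Invalid wanted_types (%s) - should be one of all/credited/real' %
--                                (wanted_types))
--     txt = raw_txt.strip()
--     if txt.startswith('(') and txt.endswith(')'):
--         txt = txt[1:-1].strip()
--     if PSEUDONYM_SEPARATOR not in txt:
--         return [z.strip() for z in txt.split(MULTIPLE_AUTHORS_SEPARATOR)]
--     real_name, pseudonym = txt.split(PSEUDONYM_SEPARATOR)
--     if wanted_types == 'all':
--         return _leaf_authors(pseudonym) + _leaf_authors(real_name)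
--     if wanted_types == 'real':
--         return _leaf_authors(pseudonym if real_name in DONT_USE_THESE_REAL_NAMES
--                              else real_name)
--     return _leaf_authors(pseudonym)
-- ===== Notes on version B (the rewrite author's own statement) =====
-- stated objective: simpler
-- what changed: A's self-recursion (the function re-enters itself on each piece of the pseudonym split) is replaced by a single non-recursive leaf helper that strips, drops one surrounding paren pair and splits on the multi-author separator, applied once per piece of the single pseudonym split.
import Mathlib
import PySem

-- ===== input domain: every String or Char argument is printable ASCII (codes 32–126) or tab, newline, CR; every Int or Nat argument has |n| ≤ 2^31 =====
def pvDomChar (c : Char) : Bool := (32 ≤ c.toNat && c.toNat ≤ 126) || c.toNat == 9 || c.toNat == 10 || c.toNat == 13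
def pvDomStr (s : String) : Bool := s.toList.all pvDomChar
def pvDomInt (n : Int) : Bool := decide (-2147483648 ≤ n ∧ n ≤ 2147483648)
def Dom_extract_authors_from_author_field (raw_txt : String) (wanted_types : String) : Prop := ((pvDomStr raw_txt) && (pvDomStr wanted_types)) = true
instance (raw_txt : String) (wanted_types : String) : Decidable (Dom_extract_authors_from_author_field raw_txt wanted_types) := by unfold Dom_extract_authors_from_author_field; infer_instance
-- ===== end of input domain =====

-- B replaces A's self-recursion by a non-recursive leaf helper (strip, drop one '(...)' pair,
-- split on '+', strip the pieces) applied once per '^'-piece; same return value, simpler control flow.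

-- ===== PORT A =====
-- A is self-recursive; the Nat fuel is only a totality guard (the recursion depth cannot
-- exceed the input length, so the fuel-0 arm is unreachable from the wrapper below).
def pvA_fuel : Nat → String → String → List String
  | 0, _, _ => []
  | fuel+1, raw_txt, wanted_types =>
    -- raise BadArgumentError (excluded by Pre_)
    if ¬ (wanted_types = "all" ∨ wanted_types = "credited" ∨ wanted_types = "real") then []
    else
      let txt0 := PySem.Str.strip raw_txt
      let txt := if PySem.Str.startswith txt0 "(" && PySem.Str.endswith txt0 ")"
                 then PySem.Str.strip (PySem.Str.slice txt0 (some 1) (some (-1))) else txt0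
      if PySem.Str.isIn "^" txt then
        match (PySem.Str.split? txt "^").getD [] with
        | [real_name, pseudonym] =>
          if wanted_types = "all" then
            pvA_fuel fuel pseudonym "all" ++ pvA_fuel fuel real_name "all"
          else if wanted_types = "real" then
            if ["Compton Crook"].contains real_name then pvA_fuel fuel pseudonym "all"
            else pvA_fuel fuel real_name "all"
          else pvA_fuel fuel pseudonym "all"
        | _ => []  -- ValueError from `real_name, pseudonym = txt.split('^')` (excluded by Pre_)
      else ((PySem.Str.split? txt "+").getD []).map PySem.Str.strip

def extract_authors_from_author_field (raw_txt : String) (wanted_types : String) : List String :=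
  pvA_fuel (raw_txt.toList.length + 1) raw_txt wanted_types

-- ===== PORT B =====
def pvLeafAuthors (txt : String) : List String :=
  let t0 := PySem.Str.strip txt
  let t := if PySem.Str.startswith t0 "(" && PySem.Str.endswith t0 ")"
           then PySem.Str.strip (PySem.Str.slice t0 (some 1) (some (-1))) else t0
  ((PySem.Str.split? t "+").getD []).map PySem.Str.strip

def extract_authors_from_author_field_alt (raw_txt : String) (wanted_types : String) : List String :=
  -- raise BadArgumentError (excluded by Pre_)
  if ¬ (wanted_types = "all" ∨ wanted_types = "credited" ∨ wanted_types = "real") then []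
  else
    let txt0 := PySem.Str.strip raw_txt
    let txt := if PySem.Str.startswith txt0 "(" && PySem.Str.endswith txt0 ")"
               then PySem.Str.strip (PySem.Str.slice txt0 (some 1) (some (-1))) else txt0
    if !(PySem.Str.isIn "^" txt) then
      ((PySem.Str.split? txt "+").getD []).map PySem.Str.strip
    else
      match (PySem.Str.split? txt "^").getD [] with
      | [real_name, pseudonym] =>
        if wanted_types = "all" then pvLeafAuthors pseudonym ++ pvLeafAuthors real_name
        else if wanted_types = "real" then
          pvLeafAuthors (if ["Compton Crook"].contains real_name then pseudonym else real_name)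
        else pvLeafAuthors pseudonym
      | _ => []  -- ValueError from `real_name, pseudonym = txt.split('^')` (excluded by Pre_)

-- ===== PRECONDITION & SPEC =====
-- the '.strip()' + one-'(...)'-pair sanitisation A applies before looking for '^' (used only by Pre_)
def pvProcessed (raw_txt : String) : List Char :=
  let t := PySem.Chars.strip raw_txt.toList
  if PySem.Chars.startswith t ['('] && PySem.Chars.endswith t [')']
  then PySem.Chars.strip (PySem.Chars.slice t (some 1) (some (-1))) else t

-- Pre_ excludes exactly the inputs where the Python A raises: an invalid wanted_types
-- (BadArgumentError), and two or more '^' in the sanitised text (ValueError from the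
-- two-element unpack of txt.split('^')).
def Pre_extract_authors_from_author_field (raw_txt : String) (wanted_types : String) : Prop :=
  (wanted_types = "all" ∨ wanted_types = "credited" ∨ wanted_types = "real") ∧
  (pvProcessed raw_txt).count '^' ≤ 1

instance (raw_txt : String) (wanted_types : String) : Decidable (Pre_extract_authors_from_author_field raw_txt wanted_types) := by unfold Pre_extract_authors_from_author_field; infer_instance

def pvWitness_extract_authors_from_author_field : String × String := ("(a+b)^c", "all")

def Spec_extract_authors_from_author_field (raw_txt : String) (wanted_types : String) (out : List String) : Prop := out = extract_authors_from_author_field_alt raw_txt wanted_types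
instance (raw_txt : String) (wanted_types : String) (out : List String) : Decidable (Spec_extract_authors_from_author_field raw_txt wanted_types out) := by unfold Spec_extract_authors_from_author_field; infer_instance

-- ===== CLAIM (what is proved, stated in full; the proofs are below) =====
def Claim_equal_extract_authors_from_author_field : Prop := ∀ (raw_txt : String) (wanted_types : String), Dom_extract_authors_from_author_field raw_txt wanted_types → Pre_extract_authors_from_author_field raw_txt wanted_types → Spec_extract_authors_from_author_field raw_txt wanted_types (extract_authors_from_author_field raw_txt wanted_types)

-- ===== LEMMAS AND PROOFS =====

theorem pv_mem_strip {c : Char} {cs : List Char} (h : c ∈ PySem.Chars.strip cs) : c ∈ cs := by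
  unfold PySem.Chars.strip PySem.Chars.rstrip PySem.Chars.lstrip at h
  have h1 := (List.dropWhile_sublist _).mem (List.mem_reverse.mp h)
  exact (List.dropWhile_sublist _).mem (List.mem_reverse.mp h1)

theorem pv_mem_slice {c : Char} {cs : List Char} {a b : Option Int}
    (h : c ∈ PySem.List.slice cs a b) : c ∈ cs := by
  unfold PySem.List.slice at h
  exact ((List.take_sublist _ _).trans (List.drop_sublist _ _)).mem h

theorem pv_isIn_caret_false {s : List Char} (h : '^' ∉ s) :
    PySem.Chars.isIn ['^'] s = false := by
  rw [PySem.Chars.isIn_eq_false_iff]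
  intro hin
  exact h (hin.subset (by simp))

-- A's recursive call on a '^'-free string reduces to B's leaf helper.
theorem pv_leaf_eval (fuel : Nat) (p : String) (h : '^' ∉ p.toList) :
    pvA_fuel (fuel+1) p "all" = pvLeafAuthors p := by
  have h0 : '^' ∉ (PySem.Str.strip p).toList := by
    rw [PySem.Str.toList_strip]; exact fun hx => h (pv_mem_strip hx)
  have hisin : ∀ t : String, '^' ∉ t.toList → PySem.Str.isIn "^" t = false := by
    intro t ht
    rw [PySem.Str.isIn_eq]
    exact pv_isIn_caret_false ht
  simp only [pvA_fuel, pvLeafAuthors]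
  rw [if_neg (by simp)]
  by_cases hpar : (PySem.Str.startswith (PySem.Str.strip p) "(" &&
      PySem.Str.endswith (PySem.Str.strip p) ")") = true
  · simp only [hpar, if_true]
    rw [hisin _ ?_]
    · simp only [Bool.false_eq_true, if_false]
    · rw [PySem.Str.toList_strip, PySem.Str.toList_slice, PySem.Chars.slice_eq_listSlice]
      intro hx
      exact h0 (pv_mem_slice (pv_mem_strip hx))
  · rw [Bool.not_eq_true] at hpar
    simp only [hpar, Bool.false_eq_true, if_false]
    rw [hisin _ h0]
    simp

theorem pv_splitOn_go_no_caret : ∀ (fuel : Nat) (l cur : List Char) (acc : List (List Char)),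
    l.length < fuel → (∀ x ∈ acc, '^' ∉ x) → '^' ∉ cur →
    ∀ p ∈ PySem.Chars.splitOn.go ['^'] fuel l cur acc, '^' ∉ p := by
  intro fuel
  induction fuel with
  | zero => intro l cur acc hlen; omega
  | succ n ih =>
    intro l cur acc hlen hacc hcur p hp
    cases l with
    | nil =>
      simp only [PySem.Chars.splitOn.go, List.reverse_cons, List.mem_append, List.mem_reverse,
        List.mem_cons] at hp
      rcases hp with hp | hp | hp
      · exact hacc p (by simpa using hp)
      · subst hp; simpa using hcur
      · simp at hp
    | cons c rest =>
      rw [PySem.Chars.splitOn.go] at hp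
      by_cases hpre : ['^'].isPrefixOf (c :: rest) = true
      · rw [if_pos hpre] at hp
        refine ih _ [] (cur.reverse :: acc) (by simpa using Nat.lt_of_succ_lt_succ hlen) ?_ (by simp) p hp
        intro x hx
        rcases List.mem_cons.mp hx with h | h
        · subst h; simpa using hcur
        · exact hacc x h
      · rw [if_neg hpre] at hp
        have hc : c ≠ '^' := by
          intro hc; subst hc; simp [List.isPrefixOf] at hpre
        refine ih rest (c :: cur) acc (by simpa using Nat.lt_of_succ_lt_succ hlen) hacc ?_ p hp
        intro hx
        rcases List.mem_cons.mp hx with h | h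
        · exact hc h.symm
        · exact hcur h

theorem pv_mem_splitOn_no_caret {cs p : List Char}
    (h : p ∈ PySem.Chars.splitOn cs ['^']) : '^' ∉ p :=
  pv_splitOn_go_no_caret (cs.length + 1) cs [] [] (by omega) (by simp) (by simp) p h

theorem pv_getD_split_caret (t : String) :
    (PySem.Str.split? t "^").getD [] = (PySem.Chars.splitOn t.toList ['^']).map String.ofList := by
  simp [PySem.Str.split?, PySem.Chars.split?]

theorem pv_main : ∀ (raw w : String),
    (w = "all" ∨ w = "credited" ∨ w = "real") →
    extract_authors_from_author_field raw w = extract_authors_from_author_field_alt raw w := by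
  intro raw w hw
  unfold extract_authors_from_author_field extract_authors_from_author_field_alt
  simp only [pvA_fuel]
  rw [if_neg (not_not_intro hw), if_neg (not_not_intro hw)]
  have hsub : ∀ c, c ∈ (if PySem.Str.startswith (PySem.Str.strip raw) "(" && PySem.Str.endswith (PySem.Str.strip raw) ")" then PySem.Str.strip (PySem.Str.slice (PySem.Str.strip raw) (some 1) (some (-1))) else PySem.Str.strip raw).toList → c ∈ raw.toList := by
    intro c hc
    split at hc
    · rw [PySem.Str.toList_strip, PySem.Str.toList_slice, PySem.Chars.slice_eq_listSlice] at hc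
      have := pv_mem_slice (pv_mem_strip hc)
      rw [PySem.Str.toList_strip] at this
      exact pv_mem_strip this
    · rw [PySem.Str.toList_strip] at hc
      exact pv_mem_strip hc
  set txt := (if PySem.Str.startswith (PySem.Str.strip raw) "(" && PySem.Str.endswith (PySem.Str.strip raw) ")" then PySem.Str.strip (PySem.Str.slice (PySem.Str.strip raw) (some 1) (some (-1))) else PySem.Str.strip raw) with htxt
  by_cases hin : PySem.Str.isIn "^" txt = true
  · obtain ⟨m, hm⟩ : ∃ m, raw.toList.length = m + 1 := by
      have hmemtxt : '^' ∈ txt.toList := by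
        rw [PySem.Str.isIn_eq] at hin
        exact ((PySem.Chars.isIn_iff_infix _ _).mp hin).subset (by simp)
      have hmem := hsub _ hmemtxt
      have hne : raw.toList.length ≠ 0 := by
        intro h0
        rw [List.length_eq_zero_iff] at h0
        simp [h0] at hmem
      exact ⟨raw.toList.length - 1, by omega⟩
    rw [hm]
    simp only [hin, if_true, Bool.not_true, Bool.false_eq_true, if_false]
    rw [pv_getD_split_caret]
    cases hsp : PySem.Chars.splitOn txt.toList ['^'] with
    | nil => simp
    | cons x tl =>
      cases tl with
      | nil => simp
      | cons y tl2 =>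
        cases tl2 with
        | cons z tl3 => simp
        | nil =>
          have hx : '^' ∉ x := pv_mem_splitOn_no_caret (by rw [hsp]; simp)
          have hy : '^' ∉ y := pv_mem_splitOn_no_caret (by rw [hsp]; simp)
          simp only [List.map_cons, List.map_nil]
          rw [pv_leaf_eval m (String.ofList x) (by simpa using hx),
              pv_leaf_eval m (String.ofList y) (by simpa using hy)]
          split_ifs <;> rfl
  · rw [Bool.not_eq_true] at hin
    simp only [hin, Bool.not_false, if_true, Bool.false_eq_true, if_false]

-- ===== VERDICT (by name: the statement is the Claim_ definition above) =====
theorem extract_authors_from_author_field_spec : Claim_equal_extract_authors_from_author_field := by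
  intro raw_txt wanted_types _hDom hPre
  exact pv_main raw_txt wanted_types hPre.1
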